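-- pv_equiv track=rewrite | github.com/kajksa/pyrtl433 | pyrtl433/rtlsdrutils.py | boolbit2str
-- ===== SOURCE A (Python) =====
-- def boolbit2str(boolbit):
--     """Convert boolean array to bit string for printing."""
--     ret = ""
--     zero = "0"
--     one = "1"
--     for i in range(len(boolbit)//8):
--         byte = boolbit[i*8:(i+1)*8]
--         for b in byte:
--             if b:
--                 ret += one
--             else:
--                 ret += zero
--         ret += " "
--     byte = boolbit[8*(len(boolbit)//8):]
--     for b in byte:
--         if b:
--             ret += one
--         else:
--             ret += zero
--     return ret
-- ===== SOURCE B (Python) =====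
-- def boolbit2str(boolbit):
--     """Convert boolean array to bit string: flatten once, then chunk and join."""
--     bits = ''.join('1' if b else '0' for b in boolbit)
--     k = len(boolbit) // 8
--     groups = [bits[i * 8:(i + 1) * 8] for i in range(k)]
--     return ' '.join(groups + [bits[8 * k:]])
-- ===== Notes on version B (the rewrite author's own statement) =====
-- stated objective: simpler
-- what changed: B flattens the whole array into a single '0'/'1' string in one pass and then chunks that string into 8-character groups (plus the possibly-empty tail) joined by ' ', instead of A's nested loop that emits characters and separator spaces interleaved while slicing the input byte by byte.
import Mathlib
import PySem

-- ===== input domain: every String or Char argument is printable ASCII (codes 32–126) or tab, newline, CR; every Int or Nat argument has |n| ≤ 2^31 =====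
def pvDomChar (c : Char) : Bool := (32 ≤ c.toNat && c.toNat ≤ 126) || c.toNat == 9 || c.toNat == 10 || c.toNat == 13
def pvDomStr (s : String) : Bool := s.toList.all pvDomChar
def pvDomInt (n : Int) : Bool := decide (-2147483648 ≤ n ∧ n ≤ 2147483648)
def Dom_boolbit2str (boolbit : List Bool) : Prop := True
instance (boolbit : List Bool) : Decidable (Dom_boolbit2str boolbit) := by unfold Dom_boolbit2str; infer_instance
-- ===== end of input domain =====

-- B translates the array to one bit string and chunks it afterwards; A's nested loop emits bits and spaces interleaved. Same return value everywhere.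

-- ===== PORT A =====
-- ret is carried as a List Char (PySem's exact model of Python str concatenation); String.mk at the return.
def boolbit2str (boolbit : List Bool) : String :=
  let n : Int := boolbit.length
  let ret : List Char :=
    (PySem.List.pyRange 0 (PySem.Int.floordiv n 8)).foldl
      (fun ret i =>
        let byte := PySem.List.slice boolbit (some (i * 8)) (some ((i + 1) * 8))
        (byte.foldl (fun r b => r ++ [if b then '1' else '0']) ret) ++ [' '])
      []
  let byte := PySem.List.slice boolbit (some (8 * PySem.Int.floordiv n 8)) none
  String.mk (byte.foldl (fun r b => r ++ [if b then '1' else '0']) ret)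

-- ===== PORT B =====
def boolbit2str_alt (boolbit : List Bool) : String :=
  let bits : List Char := boolbit.map (fun b => if b then '1' else '0')
  let k : Int := PySem.Int.floordiv (boolbit.length : Int) 8
  let groups : List (List Char) :=
    (PySem.List.pyRange 0 k).map (fun i => PySem.List.slice bits (some (i * 8)) (some ((i + 1) * 8)))
  String.mk (PySem.Chars.join [' '] (groups ++ [PySem.List.slice bits (some (8 * k)) none]))

-- ===== PRECONDITION & SPEC =====
def Spec_boolbit2str (boolbit : List Bool) (out : String) : Prop := out = boolbit2str_alt boolbit
instance (boolbit : List Bool) (out : String) : Decidable (Spec_boolbit2str boolbit out) := by unfold Spec_boolbit2str; infer_instance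

-- ===== CLAIM (what is proved, stated in full; the proofs are below) =====
def Claim_equal_boolbit2str : Prop := ∀ (boolbit : List Bool), Dom_boolbit2str boolbit → Spec_boolbit2str boolbit (boolbit2str boolbit)

-- ===== LEMMAS AND PROOFS =====

-- ' '.join(gs + [t]) appends a space after each group of gs, then t.
lemma join_tail (gs : List (List Char)) (acc t : List Char) :
    acc ++ PySem.Chars.join [' '] (gs ++ [t])
      = gs.foldl (fun a g => a ++ g ++ [' ']) acc ++ t := by
  induction gs generalizing acc with
  | nil => simp [PySem.Chars.join_singleton]
  | cons g gs ih =>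
    rw [List.foldl_cons, ← ih (acc ++ g ++ [' '])]
    cases h : gs ++ [t] with
    | nil => simp at h
    | cons p ps =>
      rw [List.cons_append, h, PySem.Chars.join_cons_cons]
      simp [List.append_assoc]

-- A's inner character loop over a slice of the Bool list produces the matching slice of B's bit string.
lemma inner_loop (l : List Bool) (a b? : Option Int) (r : List Char) :
    (PySem.List.slice l a b?).foldl (fun r b => r ++ [if b then '1' else '0']) r
      = r ++ PySem.List.slice (l.map (fun b => if b then '1' else '0')) a b? := by
  rw [PySem.List.foldl_append_singleton_eq_map]
  congr 1
  simp [PySem.List.slice, PySem.List.clampIdx]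

lemma join_tail0 (gs : List (List Char)) (t : List Char) :
    PySem.Chars.join [' '] (gs ++ [t]) = gs.foldl (fun a g => a ++ g ++ [' ']) [] ++ t := by
  simpa using join_tail gs [] t

theorem boolbit2str_spec : Claim_equal_boolbit2str := by
  intro l _
  unfold Spec_boolbit2str boolbit2str boolbit2str_alt
  simp only [inner_loop]
  congr 1
  rw [join_tail0, List.foldl_map]
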